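-- pv_equiv track=rewrite | github.com/meddizzle316/atlas-machine_learning | math/linear_algebra/5-across_the_planes.py | matrix_length
-- ===== SOURCE A (Python) =====
-- def matrix_length(matrix, x, n):
--     """function that finds the length of matrix at dimension n"""
--     if isinstance(matrix, list):
--         if matrix and isinstance(matrix[0], list) and x < n:
--             x += 1
--             return matrix_length(matrix[0], x, n)
--         elif matrix and x == n:
--             return len(matrix)
--     else:
--         return 0
-- ===== SOURCE B (Python) =====
-- def matrix_length(matrix, x, n):
--     """Closed-form case analysis on n - x instead of recursive descent
--     (for the 2-D list-of-lists inputs this task is about)."""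
--     if not matrix:
--         return None
--     if n == x:
--         return len(matrix)
--     if n == x + 1 and isinstance(matrix[0], list) and matrix[0]:
--         return len(matrix[0])
--     return None
-- ===== Notes on version B (the rewrite author's own statement) =====
-- stated objective: simpler
-- what changed: Replaces the recursive descent into matrix[0] with a direct closed-form case analysis on n - x (n == x gives len(matrix), n == x+1 gives len(matrix[0]) when nonempty, otherwise None).
import Mathlib
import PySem

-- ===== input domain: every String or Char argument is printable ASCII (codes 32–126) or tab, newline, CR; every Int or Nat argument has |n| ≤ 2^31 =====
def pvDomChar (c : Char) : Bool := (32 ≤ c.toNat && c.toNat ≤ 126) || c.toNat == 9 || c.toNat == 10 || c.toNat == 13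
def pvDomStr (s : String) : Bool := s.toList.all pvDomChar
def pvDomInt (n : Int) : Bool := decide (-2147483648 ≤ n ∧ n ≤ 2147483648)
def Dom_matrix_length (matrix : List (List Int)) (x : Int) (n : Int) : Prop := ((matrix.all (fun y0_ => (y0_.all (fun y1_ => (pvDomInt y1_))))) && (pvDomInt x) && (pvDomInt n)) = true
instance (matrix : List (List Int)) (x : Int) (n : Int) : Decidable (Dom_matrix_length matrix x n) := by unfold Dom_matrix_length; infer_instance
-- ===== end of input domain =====

-- B replaces A's recursive descent with a closed-form case analysis on n - x (objective: simpler).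

-- ===== PORT A =====
-- A's recursive call crosses a type level (List (List Int) → List Int), so the inner
-- call is transliterated as a helper: there matrix[0] is an Int, never a list, so the
-- first branch is always false and only the `elif matrix and x == n` branch remains.
def matrix_length_inner (row : List Int) (x : Int) (n : Int) : Option Int :=
  if row ≠ [] ∧ x = n then some (row.length : Int) else none

def matrix_length (matrix : List (List Int)) (x : Int) (n : Int) : Option Int :=
  match matrix with
  | [] => none                                  -- both guarded branches need `matrix`; implicit None
  | h :: t =>
    if x < n then matrix_length_inner h (x + 1) n   -- matrix[0] is a list here
    else if x = n then some ((h :: t).length : Int)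
    else none

-- ===== PORT B =====
def matrix_length_alt (matrix : List (List Int)) (x : Int) (n : Int) : Option Int :=
  if matrix = [] then none
  else if n = x then some (matrix.length : Int)
  else if n = x + 1 ∧ matrix.headD [] ≠ [] then some ((matrix.headD []).length : Int)
  else none

-- ===== PRECONDITION & SPEC =====
def Spec_matrix_length (matrix : List (List Int)) (x : Int) (n : Int) (out : Option Int) : Prop := out = matrix_length_alt matrix x n
instance (matrix : List (List Int)) (x : Int) (n : Int) (out : Option Int) : Decidable (Spec_matrix_length matrix x n out) := by unfold Spec_matrix_length; infer_instance

-- ===== CLAIM (what is proved, stated in full; the proofs are below) =====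
def Claim_equal_matrix_length : Prop := ∀ (matrix : List (List Int)) (x : Int) (n : Int), Dom_matrix_length matrix x n → Spec_matrix_length matrix x n (matrix_length matrix x n)

-- ===== LEMMAS AND PROOFS =====

-- ===== VERDICT (by name: the statement is the Claim_ definition above) =====
theorem matrix_length_spec : Claim_equal_matrix_length := by
  intro matrix x n _
  unfold Spec_matrix_length matrix_length matrix_length_alt matrix_length_inner
  cases matrix with
  | nil => simp
  | cons h t =>
    simp only [List.headD_cons, reduceCtorEq, if_false]
    split_ifs with h1 h2 h3 h4 h5 h6 h7 h8 <;> first | rfl | (exfalso; omega) | (exfalso; simp_all)
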